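-- pv_equiv track=rewrite | github.com/foreverxujiahuan/algorithm | 字符串/lc1668.py | maxRepeating
-- ===== SOURCE A (Python) =====
-- def maxRepeating(sequence: str, word: str) -> int:
--     valid = len(sequence) // len(word)
--     valid += 1
--     ans = valid
--     while valid > 0:
--         if word * ans in sequence:
--             return ans
--         ans -= 1
--     return ans
-- ===== SOURCE B (Python) =====
-- def maxRepeating(sequence: str, word: str) -> int:
--     m = len(word)
--     n = len(sequence)
--     dp = [0] * n
--     best = 0
--     for i in range(m - 1, n):
--         if sequence[i - m + 1 : i + 1] == word:
--             c = (dp[i - m] if i - m >= 0 else 0) + 1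
--             dp[i] = c
--             if c > best:
--                 best = c
--     return best
-- ===== Notes on version B (the rewrite author's own statement) =====
-- stated objective: alternative
-- what changed: Replaces A's countdown over k testing 'word*k in sequence' by a single left-to-right DP scan that keeps a running count of consecutive copies of word ending at each position and returns the maximum count.
import Mathlib
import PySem

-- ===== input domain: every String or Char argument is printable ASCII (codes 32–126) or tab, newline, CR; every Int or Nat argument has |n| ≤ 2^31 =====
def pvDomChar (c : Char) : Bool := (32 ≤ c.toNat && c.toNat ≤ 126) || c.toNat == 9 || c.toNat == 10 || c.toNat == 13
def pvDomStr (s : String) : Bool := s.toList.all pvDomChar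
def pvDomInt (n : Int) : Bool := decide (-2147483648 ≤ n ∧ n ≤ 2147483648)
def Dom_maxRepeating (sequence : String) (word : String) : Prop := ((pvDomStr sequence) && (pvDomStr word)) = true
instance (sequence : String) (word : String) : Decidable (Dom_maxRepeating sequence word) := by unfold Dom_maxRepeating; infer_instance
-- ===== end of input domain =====

-- B replaces A's repeated `word*k in sequence` containment tests (k counting down) by a single
-- left-to-right DP scan counting consecutive copies of `word`; alternative algorithm, not measured faster.

-- ===== PORT A =====
-- A's while-loop: `valid` is constant, `ans` counts down; fuel only makes the recursion total
-- (the loop always returns by ans = 0, since the empty string is contained in every string).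
def maxRepeatingLoopA (sequence word : String) (valid : Int) : Nat → Int → Int
  | 0, ans => ans
  | fuel + 1, ans =>
    if valid > 0 then
      if PySem.Str.isIn (String.ofList (PySem.List.pyRepeat word.toList ans)) sequence then ans
      else maxRepeatingLoopA sequence word valid fuel (ans - 1)
    else ans

def maxRepeating (sequence : String) (word : String) : Int :=
  let valid := PySem.Int.floordiv (PySem.Str.len sequence) (PySem.Str.len word) + 1
  maxRepeatingLoopA sequence word valid (valid.toNat + 1) valid

-- ===== PORT B =====
-- Source B's single pass: state (dp, best), i over range(m-1, n); dp[i] = c is List.set (0 ≤ i on Pre_).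
def maxRepeatingLoopB (s w : List Char) (m : Int) (st : List Int × Int) (i : Int) : List Int × Int :=
  if PySem.List.slice s (some (i - m + 1)) (some (i + 1)) = w then
    let c := (if i - m ≥ 0 then PySem.List.pyGetD st.1 (i - m) 0 else 0) + 1
    (st.1.set i.toNat c, if c > st.2 then c else st.2)
  else st

def maxRepeating_alt (sequence : String) (word : String) : Int :=
  let m : Int := PySem.Str.len word
  let n : Int := PySem.Str.len sequence
  let dp : List Int := PySem.List.pyRepeat [0] n
  ((PySem.List.pyRange (m - 1) n 1).foldl
    (maxRepeatingLoopB sequence.toList word.toList m) (dp, 0)).2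

-- ===== PRECONDITION & SPEC =====
-- Pre_ excludes only word = "" where A raises ZeroDivisionError.
def Pre_maxRepeating (sequence : String) (word : String) : Prop := word ≠ ""
instance (sequence : String) (word : String) : Decidable (Pre_maxRepeating sequence word) := by unfold Pre_maxRepeating; infer_instance
def pvWitness_maxRepeating : String × String := ("ababab", "ab")

def Spec_maxRepeating (sequence : String) (word : String) (out : Int) : Prop := out = maxRepeating_alt sequence word
instance (sequence : String) (word : String) (out : Int) : Decidable (Spec_maxRepeating sequence word out) := by unfold Spec_maxRepeating; infer_instance

-- ===== CLAIM (what is proved, stated in full; the proofs are below) =====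
def Claim_equal_maxRepeating : Prop := ∀ (sequence : String) (word : String), Dom_maxRepeating sequence word → Pre_maxRepeating sequence word → Spec_maxRepeating sequence word (maxRepeating sequence word)

-- ===== LEMMAS AND PROOFS =====

-- k concatenated copies of w
def wRep (w : List Char) : Nat → List Char
  | 0 => []
  | k + 1 => wRep w k ++ w

def runLen (s w : List Char) (j : Nat) : Nat :=
  if h1 : 1 ≤ w.length ∧ w.length ≤ j + 1 then
    if List.take w.length (List.drop (j + 1 - w.length) s) = w then
      (if h2 : w.length ≤ j then runLen s w (j - w.length) else 0) + 1
    else 0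
  else 0
termination_by j
decreasing_by omega

def bestLe (s w : List Char) : Nat → Nat
  | 0 => 0
  | k + 1 => if PySem.Chars.isIn (PySem.List.pyRepeat w ((k : Int) + 1)) s then k + 1 else bestLe s w k

theorem wRep_eq_pyRepeat (w : List Char) (k : Nat) : wRep w k = PySem.List.pyRepeat w (k : Int) := by
  induction k with
  | zero => rfl
  | succ k ih =>
    simp only [wRep, PySem.List.pyRepeat] at *
    rw [ih]
    simp [List.replicate_succ']

theorem wRep_add (w : List Char) (a b : Nat) : wRep w (a + b) = wRep w a ++ wRep w b := by
  induction b with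
  | zero => simp [wRep]
  | succ b ih => rw [show a + (b+1) = (a+b)+1 by omega]; simp [wRep, ih]

theorem length_wRep (w : List Char) (k : Nat) : (wRep w k).length = k * w.length := by
  induction k with
  | zero => simp [wRep]
  | succ k ih => simp [wRep, ih]; ring

theorem runLen_eq (s w : List Char) (j : Nat) (hm : 1 ≤ w.length) (hj : w.length ≤ j + 1) :
    runLen s w j = if List.take w.length (List.drop (j + 1 - w.length) s) = w then
      (if w.length ≤ j then runLen s w (j - w.length) else 0) + 1 else 0 := by
  rw [runLen, dif_pos ⟨hm, hj⟩]
  split_ifs <;> rfl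

theorem runLen_eq_zero (s w : List Char) (j : Nat) (hj : ¬ (1 ≤ w.length ∧ w.length ≤ j + 1)) :
    runLen s w j = 0 := by
  rw [runLen, dif_neg hj]

-- L4: the run ending at j really is runLen copies of w, ending at position j
theorem wRep_runLen_suffix (s w : List Char) (hm : 1 ≤ w.length) :
    ∀ j, wRep w (runLen s w j) <:+ List.take (j + 1) s := by
  intro j
  induction j using Nat.strong_induction_on with
  | _ j ih =>
    by_cases h1 : w.length ≤ j + 1
    · by_cases hocc : List.take w.length (List.drop (j + 1 - w.length) s) = w
      · have hr : runLen s w j = (if w.length ≤ j then runLen s w (j - w.length) else 0) + 1 := by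
          rw [runLen_eq s w j hm h1, if_pos hocc]
        have htake : List.take (j + 1) s = List.take (j + 1 - w.length) s ++ List.take w.length (List.drop (j + 1 - w.length) s) := by
          rw [← List.take_add]
          congr 1
          omega
        rw [hocc] at htake
        by_cases h2 : w.length ≤ j
        · have ihj := ih (j - w.length) (by omega)
          rw [hr, if_pos h2]
          show wRep w (runLen s w (j - w.length)) ++ w <:+ _
          rw [htake]
          rw [show j - w.length + 1 = j + 1 - w.length from by omega] at ihj
          obtain ⟨t, ht⟩ := ihj
          exact ⟨t, by rw [← ht]; simp⟩
        · rw [hr, if_neg h2]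
          show wRep w 0 ++ w <:+ _
          rw [htake]
          exact ⟨List.take (j + 1 - w.length) s, by simp [wRep]⟩
      · rw [runLen_eq s w j hm h1, if_neg hocc]
        exact ⟨List.take (j + 1) s, by simp [wRep]⟩
    · rw [runLen_eq_zero s w j (by omega)]
      exact ⟨List.take (j + 1) s, by simp [wRep]⟩

theorem wRep_runLen_infix (s w : List Char) (hm : 1 ≤ w.length) (j : Nat) :
    wRep w (runLen s w j) <:+: s :=
  ((wRep_runLen_suffix s w hm j).isInfix).trans (List.take_prefix _ _).isInfix

-- L5
theorem infix_wRep_le (s w : List Char) (hm : 1 ≤ w.length) (k : Nat) (h : wRep w k <:+: s) :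
    k ≤ s.length / w.length := by
  have := h.length_le
  rw [length_wRep] at this
  exact (Nat.le_div_iff_mul_le hm).2 this

-- L6
theorem exists_runLen_ge (s w : List Char) (hm : 1 ≤ w.length) (k : Nat) (hk : 1 ≤ k)
    (h : wRep w k <:+: s) :
    ∃ j, w.length - 1 ≤ j ∧ j < s.length ∧ k ≤ runLen s w j := by
  obtain ⟨p, q, hs⟩ := h
  -- hs : p ++ wRep w k ++ q = s
  have main : ∀ t, 1 ≤ t → t ≤ k → t ≤ runLen s w (p.length + t * w.length - 1) := by
    intro t h1t
    induction t, h1t using Nat.le_induction with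
    | base =>
      intro h1k
      -- occurrence of w ending at p.length + w.length - 1
      have hocc : List.take w.length (List.drop (p.length + 1 * w.length - 1 + 1 - w.length) s) = w := by
        rw [show p.length + 1 * w.length - 1 + 1 - w.length = p.length + 0 * w.length from by omega]
        have : s = (p ++ wRep w 0) ++ (wRep w k ++ q) := by
          simp [wRep, ← hs]
        rw [this, show p.length + 0 * w.length = (p ++ wRep w 0).length from by simp [length_wRep],
          List.drop_left]
        rw [show k = 1 + (k - 1) from by omega, wRep_add] at *
        rw [show wRep w 1 = w from by simp [wRep], List.append_assoc, List.take_left]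
      rw [runLen_eq s w _ hm (by omega), if_pos hocc]
      omega
    | succ t ht ih =>
      intro htk
      have iht := ih (by omega)
      have hdist : (t+1) * w.length = t * w.length + w.length := by ring
      have hocc : List.take w.length (List.drop (p.length + (t+1) * w.length - 1 + 1 - w.length) s) = w := by
        rw [show p.length + (t+1) * w.length - 1 + 1 - w.length = p.length + t * w.length from by omega]
        have hsplit : s = (p ++ wRep w t) ++ (wRep w (k - t) ++ q) := by
          rw [← hs, show k = t + (k - t) from by omega, wRep_add]
          simp
        rw [hsplit, show p.length + t * w.length = (p ++ wRep w t).length from by simp [length_wRep],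
          List.drop_left]
        rw [show k - t = 1 + (k - t - 1) from by omega, wRep_add,
          show wRep w 1 = w from by simp [wRep], List.append_assoc, List.take_left]
      have hw2 : w.length ≤ t * w.length := Nat.le_mul_of_pos_left _ (by omega)
      have hwle : w.length ≤ p.length + (t+1) * w.length - 1 := by
        have : (t+1) * w.length = t * w.length + w.length := by ring
        omega
      rw [runLen_eq s w _ hm (by omega), if_pos hocc, if_pos hwle]
      rw [show p.length + (t+1) * w.length - 1 - w.length = p.length + t * w.length - 1 from by
        have : (t+1) * w.length = t * w.length + w.length := by ring
        omega]
      omega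
  have hw : w.length ≤ k * w.length := Nat.le_mul_of_pos_left _ (by omega)
  have hlen : s.length = p.length + (k * w.length + q.length) := by
    rw [← hs]; simp [length_wRep]
  exact ⟨p.length + k * w.length - 1, by omega, by omega, main k hk le_rfl⟩

-- A's countdown loop computes bestLe
theorem loopA_eq (seq word : String) (v : Int) (hv : 0 < v) :
    ∀ (fuel : Nat) (k : Nat), k < fuel →
      maxRepeatingLoopA seq word v fuel (k : Int) = (bestLe seq.toList word.toList k : Int) := by
  intro fuel
  induction fuel with
  | zero => intro k hk; omega
  | succ fuel ih =>
    intro k hk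
    rw [maxRepeatingLoopA, if_pos hv]
    simp only [PySem.Str.isIn, String.toList_ofList]
    cases k with
    | zero =>
      rw [if_pos]
      · rfl
      · rw [show PySem.List.pyRepeat word.toList ((0 : Nat) : Int) = [] from rfl]
        exact PySem.Chars.isIn_nil _
    | succ k =>
      rw [bestLe]
      simp only [Nat.cast_add, Nat.cast_one]
      by_cases hin : PySem.Chars.isIn (PySem.List.pyRepeat word.toList ((k : Int) + 1)) seq.toList = true
      · rw [if_pos hin, if_pos hin]; push_cast; ring
      · rw [if_neg hin, if_neg hin]
        rw [show (k : Int) + 1 - 1 = (k : Int) from by ring]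
        exact ih k (by omega)

theorem bestLe_eq (s w : List Char) (K R : Nat)
    (hP : PySem.Chars.isIn (PySem.List.pyRepeat w (R : Int)) s = true)
    (hRK : R ≤ K)
    (hmax : ∀ k, k ≤ K → PySem.Chars.isIn (PySem.List.pyRepeat w (k : Int)) s = true → k ≤ R) :
    bestLe s w K = R := by
  induction K with
  | zero => simp only [bestLe]; omega
  | succ K ih =>
    rw [bestLe]
    by_cases hin : PySem.Chars.isIn (PySem.List.pyRepeat w ((K : Int) + 1)) s = true
    · rw [if_pos hin]
      have := hmax (K + 1) le_rfl (by rw [show ((K + 1 : Nat) : Int) = (K : Int) + 1 from by push_cast; ring]; exact hin)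
      omega
    · rw [if_neg hin]
      refine ih ?_ (fun k hk h => hmax k (by omega) h)
      rcases Nat.lt_or_ge R (K + 1) with h | h
      · omega
      · exfalso
        have : R = K + 1 := by omega
        rw [this, show ((K + 1 : Nat) : Int) = (K : Int) + 1 from by push_cast; ring] at hP
        exact hin hP

theorem pyRange_one_nil (a b : Int) (h : b ≤ a) : PySem.List.pyRange a b 1 = [] := by
  simp [PySem.List.pyRange, show ¬ (a < b) from by omega]

theorem loopB_body (s w : List Char) (m : Int) (st : List Int × Int) (i : Int) :
    maxRepeatingLoopB s w m st i =
      if PySem.List.slice s (some (i - m + 1)) (some (i + 1)) = w then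
        (st.1.set i.toNat ((if i - m ≥ 0 then PySem.List.pyGetD st.1 (i - m) 0 else 0) + 1),
         if ((if i - m ≥ 0 then PySem.List.pyGetD st.1 (i - m) 0 else 0) + 1) > st.2
         then ((if i - m ≥ 0 then PySem.List.pyGetD st.1 (i - m) 0 else 0) + 1) else st.2)
      else st := rfl

-- one step of B's fold preserves the invariant
theorem loopB_step (s w : List Char) (hm : 1 ≤ w.length) (e : Nat) (he : w.length - 1 ≤ e)
    (hen : e + 1 ≤ s.length) (st : List Int × Int)
    (hlen : st.1.length = s.length)
    (hdp : ∀ j : Nat, j < s.length →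
      st.1.getD j 0 = if w.length - 1 ≤ j ∧ j < e then ((runLen s w j : Int)) else 0)
    (hpos : 0 ≤ st.2)
    (hle : ∀ j : Nat, w.length - 1 ≤ j → j < e → (runLen s w j : Int) ≤ st.2)
    (hwit : 0 < st.2 → ∃ j : Nat, w.length - 1 ≤ j ∧ j < e ∧ (runLen s w j : Int) = st.2) :
    (maxRepeatingLoopB s w (w.length : Int) st (e : Int)).1.length = s.length ∧
    (∀ j : Nat, j < s.length →
      (maxRepeatingLoopB s w (w.length : Int) st (e : Int)).1.getD j 0 =
        if w.length - 1 ≤ j ∧ j < e + 1 then ((runLen s w j : Int)) else 0) ∧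
    0 ≤ (maxRepeatingLoopB s w (w.length : Int) st (e : Int)).2 ∧
    (∀ j : Nat, w.length - 1 ≤ j → j < e + 1 →
      (runLen s w j : Int) ≤ (maxRepeatingLoopB s w (w.length : Int) st (e : Int)).2) ∧
    (0 < (maxRepeatingLoopB s w (w.length : Int) st (e : Int)).2 →
      ∃ j : Nat, w.length - 1 ≤ j ∧ j < e + 1 ∧
        (runLen s w j : Int) = (maxRepeatingLoopB s w (w.length : Int) st (e : Int)).2) := by
  have hcond : PySem.List.slice s (some ((e : Int) - (w.length : Int) + 1)) (some ((e : Int) + 1)) =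
      List.take w.length (List.drop (e + 1 - w.length) s) := by
    have hb1 : (e : Int) - (w.length : Int) + 1 = ((e + 1 - w.length : Nat) : Int) := by push_cast; omega
    have hb2 : (e : Int) + 1 = ((e + 1 : Nat) : Int) := by push_cast; ring
    rw [hb1, hb2, PySem.List.slice_natCast]
    congr 1
    omega
  have hrun := runLen_eq s w e hm (by omega)
  rw [loopB_body, hcond]
  by_cases hC : List.take w.length (List.drop (e + 1 - w.length) s) = w
  · rw [if_pos hC]
    rw [if_pos hC] at hrun
    have hc : (if (e : Int) - (w.length : Int) ≥ 0 then PySem.List.pyGetD st.1 ((e : Int) - (w.length : Int)) 0 else 0) + 1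
        = (runLen s w e : Int) := by
      by_cases hme : w.length ≤ e
      · have hc1 : (e : Int) - (w.length : Int) ≥ 0 := by omega
        have hc2 : (e : Int) - (w.length : Int) = ((e - w.length : Nat) : Int) := by push_cast; omega
        rw [if_pos hc1, hc2, PySem.List.pyGetD_natCast]
        have hdpv := hdp (e - w.length) (by omega)
        have hgv : st.1.getD (e - w.length) 0 = (runLen s w (e - w.length) : Int) := by
          rw [hdpv]
          have hlt : e - w.length < e := by omega
          by_cases hb : w.length - 1 ≤ e - w.length
          · rw [if_pos ⟨hb, hlt⟩]
          · have hz : runLen s w (e - w.length) = 0 :=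
              runLen_eq_zero s w (e - w.length) (by omega)
            rw [if_neg (fun h => hb h.1), hz]
            simp
        rw [hgv, hrun, if_pos hme]
        push_cast
        ring
      · have hc3 : ¬ ((e : Int) - (w.length : Int) ≥ 0) := by omega
        rw [if_neg hc3, hrun, if_neg hme]
        simp
    have hjlt : (0 : Int) < (runLen s w e : Int) := by
      rw [hrun]; split_ifs <;> push_cast <;> omega
    rw [hc]
    refine ⟨?_, ?_, ?_, ?_, ?_⟩
    · simpa using hlen
    · intro j hj
      simp only [List.getD_eq_getElem?_getD, List.getElem?_set,
        show ((e : Int)).toNat = e from Int.toNat_natCast e]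
      by_cases hje : e = j
      · subst hje
        rw [if_pos rfl, if_pos (by omega)]
        rw [if_pos ⟨by omega, by omega⟩]
        simp
      · rw [if_neg hje, ← List.getD_eq_getElem?_getD, hdp j hj]
        by_cases h1 : w.length - 1 ≤ j ∧ j < e
        · rw [if_pos h1, if_pos ⟨h1.1, by omega⟩]
        · rw [if_neg h1, if_neg (by omega)]
    · show (0 : Int) ≤ _
      split_ifs <;> omega
    · intro j hj1 hj2
      show (runLen s w j : Int) ≤ _
      by_cases hje : j = e
      · subst hje
        split_ifs <;> omega
      · have := hle j hj1 (by omega)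
        split_ifs <;> omega
    · by_cases hgt : (runLen s w e : Int) > st.2
      · rw [if_pos hgt]
        exact fun _ => ⟨e, by omega, by omega, rfl⟩
      · rw [if_neg hgt]
        intro h0
        obtain ⟨j, hj1, hj2, hj3⟩ := hwit h0
        exact ⟨j, hj1, by omega, hj3⟩
  · rw [if_neg hC]
    rw [if_neg hC] at hrun
    refine ⟨hlen, ?_, hpos, ?_, ?_⟩
    · intro j hj
      rw [hdp j hj]
      by_cases hje : j = e
      · subst hje
        rw [if_neg (by omega), if_pos ⟨by omega, by omega⟩, hrun]
        simp
      · by_cases h1 : w.length - 1 ≤ j ∧ j < e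
        · rw [if_pos h1, if_pos ⟨h1.1, by omega⟩]
        · rw [if_neg h1, if_neg (by omega)]
    · intro j hj1 hj2
      by_cases hje : j = e
      · subst hje
        rw [hrun]
        exact_mod_cast hpos
      · exact hle j hj1 (by omega)
    · intro h0
      obtain ⟨j, hj1, hj2, hj3⟩ := hwit h0
      exact ⟨j, hj1, by omega, hj3⟩

theorem loopB_inv (s w : List Char) (hm : 1 ≤ w.length) :
    ∀ (e : Nat) (he : w.length - 1 ≤ e), e ≤ s.length →
      (((PySem.List.pyRange ((w.length : Int) - 1) (e : Int) 1).foldl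
        (maxRepeatingLoopB s w (w.length : Int)) (List.replicate s.length (0 : Int), (0 : Int))).1.length = s.length ∧
      (∀ j : Nat, j < s.length →
        ((PySem.List.pyRange ((w.length : Int) - 1) (e : Int) 1).foldl
          (maxRepeatingLoopB s w (w.length : Int)) (List.replicate s.length (0 : Int), (0 : Int))).1.getD j 0 =
        if w.length - 1 ≤ j ∧ j < e then ((runLen s w j : Int)) else 0) ∧
      0 ≤ ((PySem.List.pyRange ((w.length : Int) - 1) (e : Int) 1).foldl
          (maxRepeatingLoopB s w (w.length : Int)) (List.replicate s.length (0 : Int), (0 : Int))).2 ∧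
      (∀ j : Nat, w.length - 1 ≤ j → j < e →
        (runLen s w j : Int) ≤ ((PySem.List.pyRange ((w.length : Int) - 1) (e : Int) 1).foldl
          (maxRepeatingLoopB s w (w.length : Int)) (List.replicate s.length (0 : Int), (0 : Int))).2) ∧
      (0 < ((PySem.List.pyRange ((w.length : Int) - 1) (e : Int) 1).foldl
          (maxRepeatingLoopB s w (w.length : Int)) (List.replicate s.length (0 : Int), (0 : Int))).2 →
       ∃ j : Nat, w.length - 1 ≤ j ∧ j < e ∧
        (runLen s w j : Int) = ((PySem.List.pyRange ((w.length : Int) - 1) (e : Int) 1).foldl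
          (maxRepeatingLoopB s w (w.length : Int)) (List.replicate s.length (0 : Int), (0 : Int))).2)) := by
  intro e he
  induction e, he using Nat.le_induction with
  | base =>
    intro _
    rw [pyRange_one_nil ((w.length : Int) - 1) (((w.length - 1 : Nat)) : Int) (by omega)]
    simp only [List.foldl_nil]
    refine ⟨?_, ?_, ?_, ?_, ?_⟩
    · simp
    · intro j hj
      rw [if_neg (by omega)]
      simp
    · exact le_rfl
    · exact fun j hj1 hj2 => absurd hj2 (by omega)
    · intro h0
      exact absurd h0 (by simp)
  | succ e he ih =>
    intro hen
    have hen' : e ≤ s.length := by omega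
    obtain ⟨hlen, hdp, hpos, hle, hwit⟩ := ih hen'
    have hsplit : PySem.List.pyRange ((w.length : Int) - 1) ((e + 1 : Nat) : Int) 1 =
        PySem.List.pyRange ((w.length : Int) - 1) (e : Int) 1 ++ [(e : Int)] := by
      have ha1 : ((w.length : Int) - 1) ≤ (e : Int) := by
        clear hwit hdp hle hlen
        omega
      have ha2 : (e : Int) ≤ ((e + 1 : Nat) : Int) := by
        clear hwit hdp hle hlen
        push_cast; omega
      have ha3 : (e : Int) < ((e + 1 : Nat) : Int) := by
        clear hwit hdp hle hlen
        push_cast; omega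
      have ha4 : ((e + 1 : Nat) : Int) ≤ (e : Int) + 1 := by
        clear hwit hdp hle hlen
        push_cast; omega
      rw [PySem.List.pyRange_one_append ((w.length : Int) - 1) (e : Int) ((e + 1 : Nat) : Int) ha1 ha2]
      congr 1
      rw [PySem.List.pyRange_one_cons ha3, pyRange_one_nil ((e : Int) + 1) ((e + 1 : Nat) : Int) ha4]
    rw [hsplit, List.foldl_append, List.foldl_cons, List.foldl_nil]
    exact loopB_step s w hm e he hen _ hlen hdp hpos hle hwit

-- the two characterizations agree
theorem bestLe_eq_fold (s w : List Char) (hm : 1 ≤ w.length) :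
    ((bestLe s w (s.length / w.length + 1) : Nat) : Int) =
    ((PySem.List.pyRange ((w.length : Int) - 1) (s.length : Int) 1).foldl
      (maxRepeatingLoopB s w (w.length : Int)) (List.replicate s.length (0 : Int), (0 : Int))).2 := by
  by_cases hcase : w.length - 1 ≤ s.length
  · obtain ⟨hlen, hdp, hpos, hle, hwit⟩ := loopB_inv s w hm s.length hcase le_rfl
    set best := ((PySem.List.pyRange ((w.length : Int) - 1) (s.length : Int) 1).foldl
        (maxRepeatingLoopB s w (w.length : Int)) (List.replicate s.length (0 : Int), (0 : Int))).2 with hbest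
    have hR : best = ((best.toNat : Nat) : Int) := (Int.toNat_of_nonneg hpos).symm
    set R := best.toNat with hRdef
    have hPR : PySem.Chars.isIn (PySem.List.pyRepeat w (R : Int)) s = true := by
      rcases Nat.eq_zero_or_pos R with h0 | hRpos
      · rw [h0, show PySem.List.pyRepeat w ((0 : Nat) : Int) = [] from rfl]
        exact PySem.Chars.isIn_nil s
      · obtain ⟨j, hj1, hj2, hj3⟩ := hwit (by omega)
        have hrj : runLen s w j = R := by omega
        rw [← hrj, ← wRep_eq_pyRepeat]
        exact (PySem.Chars.isIn_iff_infix _ _).2 (wRep_runLen_infix s w hm j)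
    have hRv : R ≤ s.length / w.length + 1 := by
      have := infix_wRep_le s w hm R
        ((wRep_eq_pyRepeat w R) ▸ (PySem.Chars.isIn_iff_infix _ _).1 hPR)
      omega
    have hmax : ∀ k, k ≤ s.length / w.length + 1 →
        PySem.Chars.isIn (PySem.List.pyRepeat w (k : Int)) s = true → k ≤ R := by
      intro k hkv hk
      rcases Nat.eq_zero_or_pos k with h0 | hkpos
      · omega
      · obtain ⟨j, hj1, hj2, hj3⟩ := exists_runLen_ge s w hm k hkpos
          ((wRep_eq_pyRepeat w k) ▸ (PySem.Chars.isIn_iff_infix _ _).1 hk)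
        have := hle j hj1 hj2
        omega
    rw [bestLe_eq s w (s.length / w.length + 1) R hPR hRv hmax, hR]
  · have hnil : PySem.List.pyRange ((w.length : Int) - 1) (s.length : Int) 1 = [] := by
      have hx : ((s.length : Nat) : Int) ≤ ((w.length : Int) - 1) := by omega
      exact pyRange_one_nil ((w.length : Int) - 1) ((s.length : Nat) : Int) hx
    rw [hnil]
    simp only [List.foldl_nil]
    have hv1 : s.length / w.length = 0 := Nat.div_eq_of_lt (by omega)
    have hnotin : PySem.Chars.isIn (PySem.List.pyRepeat w ((0 : Int) + 1)) s = false := by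
      rw [Bool.eq_false_iff]
      intro h
      have hinf := (PySem.Chars.isIn_iff_infix _ _).1 h
      have hl := hinf.length_le
      rw [show PySem.List.pyRepeat w ((0 : Int) + 1) = wRep w 1 from by
        rw [wRep_eq_pyRepeat]; norm_num] at hl
      rw [length_wRep] at hl
      omega
    rw [hv1]
    simp only [bestLe, Nat.cast_zero]
    rw [hnotin]
    simp

theorem maxRepeating_spec' : ∀ (sequence word : String), word ≠ "" →
    maxRepeating sequence word = maxRepeating_alt sequence word := by
  intro seq word hpre
  have hwl : word.toList ≠ [] := by
    intro h
    exact hpre (by rwa [← String.toList_eq_nil_iff])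
  have hm : 1 ≤ word.toList.length := by
    cases h : word.toList with
    | nil => exact absurd h hwl
    | cons a l => simp
  have hval : PySem.Int.floordiv (PySem.Str.len seq) (PySem.Str.len word) + 1 =
      ((seq.toList.length / word.toList.length + 1 : Nat) : Int) := by
    rw [PySem.Str.len, PySem.Str.len, PySem.Int.floordiv_natCast]
    norm_cast
  have hA : maxRepeating seq word =
      (bestLe seq.toList word.toList (seq.toList.length / word.toList.length + 1) : Int) := by
    rw [maxRepeating]
    simp only [hval, Int.toNat_natCast]
    exact loopA_eq seq word _ (by positivity) _ _ (by omega)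
  have hB0 : maxRepeating_alt seq word =
      ((PySem.List.pyRange ((word.toList.length : Int) - 1) (seq.toList.length : Int) 1).foldl
        (maxRepeatingLoopB seq.toList word.toList (word.toList.length : Int))
        (List.replicate seq.toList.length (0 : Int), (0 : Int))).2 := by
    rw [maxRepeating_alt]
    simp only [PySem.Str.len, PySem.List.pyRepeat_singleton, Int.toNat_natCast]
  rw [hA, hB0, ← bestLe_eq_fold seq.toList word.toList hm]

-- ===== VERDICT (by name: the statement is the Claim_ definition above) =====
theorem maxRepeating_spec : Claim_equal_maxRepeating := by
  intro sequence word _ hpre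
  show maxRepeating sequence word = maxRepeating_alt sequence word
  exact maxRepeating_spec' sequence word hpre
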